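-- pv_equiv track=rewrite | github.com/cloudqqiu/Wi-Matcher | models/common/pro_func.py | get_rid_of_zero
-- ===== SOURCE A (Python) =====
-- def get_rid_of_zero(s):
--     # s: string 12.300
--     flag = False
--     for i in range(len(s) - 1, -1, -1):
--         if s[i] == '.':
--             if flag:
--                 return s[:i]
--             else:
--                 return s
--         elif s[i] == '0':
--             flag = True
--         elif flag:
--             return s[:i+1]
--         else:
--             return s
-- ===== SOURCE B (Python) =====
-- def get_rid_of_zero(s):
--     # Forward scan: find how much of s to keep (up to the last non-'0' char),
--     # then drop a decimal point left bare by the stripping.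
--     cut = 0
--     for i, c in enumerate(s):
--         if c != '0':
--             cut = i + 1
--     t = s[:cut]
--     if cut < len(s) and t.endswith('.'):
--         t = t[:-1]
--     return t
-- ===== Notes on version B (the rewrite author's own statement) =====
-- stated objective: alternative
-- what changed: Replaces A's reverse scan with flag state and early returns by a forward pass that computes the keep-length (one past the last non-'0' character), takes that prefix, and drops a decimal point left bare; Pre_ excludes empty/all-zero strings, where A returns None rather than a string.
-- outside the precondition, e.g. on get_rid_of_zero(''): A returns None, B returns ''; on get_rid_of_zero('0'): A returns None, B returns ''; on get_rid_of_zero('000'): A returns None, B returns ''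
import Mathlib
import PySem

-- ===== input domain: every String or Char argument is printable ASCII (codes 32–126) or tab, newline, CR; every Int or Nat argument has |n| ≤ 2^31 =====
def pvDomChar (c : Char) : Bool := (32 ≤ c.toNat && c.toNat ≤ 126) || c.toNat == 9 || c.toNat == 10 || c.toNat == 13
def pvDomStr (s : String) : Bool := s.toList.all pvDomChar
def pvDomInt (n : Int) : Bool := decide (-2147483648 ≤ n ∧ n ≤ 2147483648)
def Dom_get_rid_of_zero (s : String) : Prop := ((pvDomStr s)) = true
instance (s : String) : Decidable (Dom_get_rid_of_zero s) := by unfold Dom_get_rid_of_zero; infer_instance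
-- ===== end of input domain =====

-- B replaces A's reverse flag-scan with early returns by a forward pass computing a keep-length,
-- a prefix take, and one bare-dot fixup (alternative decomposition); equivalence of return values on
-- Pre_ (A returns None, not a string, on empty/all-zero input).

-- ===== PORT A =====
-- the for-loop over range(len(s)-1,-1,-1) with accumulator `flag`; k+1 = number of
-- indices still to visit, so the current index i is k; s[:i] = take k, s[:i+1] = take (k+1).
def pvALoop (cs : List Char) : Nat → Bool → List Char
  | 0, _ => []          -- loop fell through: Python A returns None here (outside Pre_)
  | k+1, flag =>
    if cs.getD k ' ' = '.' then (if flag then cs.take k else cs)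
    else if cs.getD k ' ' = '0' then pvALoop cs k true
    else if flag then cs.take (k+1)
    else cs

def get_rid_of_zero (s : String) : String :=
  String.ofList (pvALoop s.toList s.toList.length false)

-- ===== PORT B =====
-- the `for i, c in enumerate(s)` loop with accumulator `cut`
def pvCut : List Char → Nat → Nat → Nat
  | [], _, acc => acc
  | c :: rest, i, acc => pvCut rest (i + 1) (if c ≠ '0' then i + 1 else acc)

def get_rid_of_zero_alt (s : String) : String :=
  let cs := s.toList
  let cut := pvCut cs 0 0
  let t := cs.take cut
  String.ofList (if cut < cs.length ∧ PySem.Chars.endswith t ['.'] then t.dropLast else t)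

-- ===== PRECONDITION & SPEC =====
-- Pre_ excludes exactly the inputs (empty string or all '0') on which Python A returns None,
-- which is not a value of the declared String type.
def Pre_get_rid_of_zero (s : String) : Prop := s.toList.any (fun c => c ≠ '0') = true
instance (s : String) : Decidable (Pre_get_rid_of_zero s) := by unfold Pre_get_rid_of_zero; infer_instance
def pvWitness_get_rid_of_zero : String := "12.300"

def Spec_get_rid_of_zero (s : String) (out : String) : Prop := out = get_rid_of_zero_alt s
instance (s : String) (out : String) : Decidable (Spec_get_rid_of_zero s out) := by unfold Spec_get_rid_of_zero; infer_instance

-- ===== CLAIM (what is proved, stated in full; the proofs are below) =====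
def Claim_equal_get_rid_of_zero : Prop := ∀ (s : String), Dom_get_rid_of_zero s → Pre_get_rid_of_zero s → Spec_get_rid_of_zero s (get_rid_of_zero s)

-- ===== LEMMAS AND PROOFS =====

-- while the remaining indices [k, k+n) all hold '0', A's loop only sets flag
theorem pvALoop_zeros (cs : List Char) (k : Nat) :
    ∀ (n : Nat) (flag : Bool), k + n ≤ cs.length →
    (∀ i (h : i < cs.length), k ≤ i → i < k + n → cs[i] = '0') →
    pvALoop cs (k + n) flag = pvALoop cs k (flag || decide (0 < n)) := by
  intro n
  induction n with
  | zero => intro flag _ _; simp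
  | succ m ih =>
    intro flag hle hz
    have hidx : k + m < cs.length := by omega
    have hc : cs.getD (k + m) ' ' = '0' := by
      rw [List.getD_eq_getElem cs ' ' hidx]
      exact hz (k + m) hidx (by omega) (by omega)
    have hc' : ¬ cs.getD (k + m) ' ' = '.' := by rw [hc]; decide
    have step : pvALoop cs (k + (m + 1)) flag = pvALoop cs (k + m) true := by
      show pvALoop cs ((k + m) + 1) flag = pvALoop cs (k + m) true
      conv_lhs => rw [pvALoop]
      rw [if_neg hc', if_pos hc]
    rw [step, ih true (by omega) (fun i h h1 h2 => hz i h h1 (by omega))]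
    simp

theorem pvCut_append (xs ys : List Char) : ∀ (i acc : Nat),
    pvCut (xs ++ ys) i acc = pvCut ys (i + xs.length) (pvCut xs i acc) := by
  induction xs with
  | nil => intro i acc; simp [pvCut]
  | cons c rest ih =>
    intro i acc
    simp only [List.cons_append, pvCut, ih, List.length_cons]
    ring_nf

theorem pvCut_zeros (zs : List Char) (hz : ∀ z ∈ zs, z = '0') :
    ∀ (i acc : Nat), pvCut zs i acc = acc := by
  induction zs with
  | nil => intro i acc; rfl
  | cons c rest ih =>
    intro i acc
    have hc : c = '0' := hz c (by simp)
    simp only [pvCut, hc]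
    rw [if_neg (by simp)]
    exact ih (fun z h => hz z (by simp [h])) _ _

theorem key (cs : List Char) (h : ∃ c ∈ cs, c ≠ '0') :
    pvALoop cs cs.length false =
      (if pvCut cs 0 0 < cs.length ∧ PySem.Chars.endswith (cs.take (pvCut cs 0 0)) ['.']
       then (cs.take (pvCut cs 0 0)).dropLast else cs.take (pvCut cs 0 0)) := by
  cases hd : cs.reverse.dropWhile (· == '0') with
  | nil =>
    exfalso
    obtain ⟨c, hc, hne⟩ := h
    have hc' : c ∈ cs.reverse := by simpa using hc
    rw [← List.takeWhile_append_dropWhile (p := (· == '0')) (l := cs.reverse), hd] at hc'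
    simp at hc'
    exact hne (by simpa using List.mem_takeWhile_imp hc')
  | cons c u =>
    have hcne : ¬ c = '0' := by
      have hne : cs.reverse.dropWhile (· == '0') ≠ [] := by simp [hd]
      have := List.head_dropWhile_not (· == '0') hne
      simp only [hd, List.head_cons] at this
      simpa using this
    -- decomposition cs = ds ++ [c] ++ zs with zs all '0'
    set zs : List Char := (cs.reverse.takeWhile (· == '0')).reverse with hzs
    set ds : List Char := u.reverse with hds
    have hzall : ∀ z ∈ zs, z = '0' := by
      intro z hz
      rw [hzs, List.mem_reverse] at hz
      simpa using List.mem_takeWhile_imp hz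
    have hcs : cs = (ds ++ [c]) ++ zs := by
      have := List.takeWhile_append_dropWhile (p := (· == '0')) (l := cs.reverse)
      rw [hd] at this
      calc cs = cs.reverse.reverse := by simp
        _ = ((cs.reverse.takeWhile (· == '0')) ++ (c :: u)).reverse := by rw [this]
        _ = (ds ++ [c]) ++ zs := by simp [hzs, hds]
    have hlen : cs.length = (ds.length + 1) + zs.length := by
      rw [hcs]; simp; omega
    have hget : cs.getD ds.length ' ' = c := by
      rw [hcs, List.append_assoc]
      rw [List.getD_eq_getElem _ ' ' (by simp)]
      simp [List.getElem_append_right (le_refl ds.length)]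
    have htake : cs.take ds.length = ds := by
      rw [hcs, List.append_assoc]
      exact List.take_left' rfl
    have htake1 : cs.take (ds.length + 1) = ds ++ [c] := by
      rw [hcs]
      exact List.take_left' (by simp)
    -- the forward pass computes cut = ds.length + 1
    have hcut : pvCut cs 0 0 = ds.length + 1 := by
      rw [hcs, List.append_assoc, pvCut_append]
      rw [pvCut_append [c] zs]
      rw [pvCut_zeros zs hzall]
      simp [pvCut, hcne]
    -- A's loop, evaluated via the decomposition
    have hzeros := pvALoop_zeros cs (ds.length + 1) zs.length false
      (by omega)
      (by
        intro i hi h1 h2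
        have heq := List.getElem_of_eq hcs hi
        rw [heq, List.getElem_append_right (by simp; omega)]
        exact hzall _ (List.getElem_mem _))
    rw [← hlen] at hzeros
    have hstep : pvALoop cs (ds.length + 1) (false || decide (0 < zs.length)) =
        (if c = '.' then (if 0 < zs.length then ds else cs)
         else if 0 < zs.length then ds ++ [c] else cs) := by
      unfold pvALoop
      rw [hget, htake, htake1]
      rcases Nat.eq_zero_or_pos zs.length with hz0 | hzp
      · simp [hz0, hcne]
      · simp [hzp, hcne]
    have hends : PySem.Chars.endswith (ds ++ [c]) ['.'] = true ↔ c = '.' := by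
      rw [PySem.Chars.endswith_iff]
      constructor
      · rintro ⟨w, hw⟩
        have := congrArg List.getLast? hw
        simpa using this.symm
      · rintro rfl; exact List.suffix_append ds ['.']
    rw [hcut, htake1, hzeros, hstep]
    rcases Nat.eq_zero_or_pos zs.length with hz0 | hzp
    · have hz0' : zs = [] := List.eq_nil_of_length_eq_zero hz0
      have hcseq : cs = ds ++ [c] := by rw [hcs, hz0']; simp
      have hcond : ¬(ds.length + 1 < cs.length ∧ PySem.Chars.endswith (ds ++ [c]) ['.'] = true) := by
        rintro ⟨h1, -⟩; omega
      rw [if_neg hcond]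
      by_cases hcdot : c = '.' <;> simp [hcdot, hz0, hcseq]
    · have hlt : ds.length + 1 < cs.length := by omega
      by_cases hcdot : c = '.'
      · subst hcdot
        have hcond : ds.length + 1 < cs.length ∧ PySem.Chars.endswith (ds ++ ['.']) ['.'] = true :=
          ⟨hlt, hends.mpr rfl⟩
        rw [if_pos hcond]
        simp [hzp]
      · have hcond : ¬(ds.length + 1 < cs.length ∧ PySem.Chars.endswith (ds ++ [c]) ['.'] = true) := by
          rintro ⟨-, hh⟩; exact hcdot (hends.mp hh)
        rw [if_neg hcond]
        simp [hcdot, hzp]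

-- ===== VERDICT (by name: the statement is the Claim_ definition above) =====
theorem get_rid_of_zero_spec : Claim_equal_get_rid_of_zero := by
  intro s _ hpre
  unfold Spec_get_rid_of_zero get_rid_of_zero get_rid_of_zero_alt
  rw [Pre_get_rid_of_zero, List.any_eq_true] at hpre
  exact congrArg String.ofList (key s.toList (by simpa using hpre))
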